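-- pv_equiv track=rewrite | github.com/pimang62/Codingtest | programmers/Lv.2/괄호 회전하기.py | check
-- ===== SOURCE A (Python) =====
-- def check(string):
--
--     pattern = {'[':']', '{':'}', '(':')'}
--     str_list = [s for s in string]
--     for k, v in pattern.items():
--         if k in string and v in string:
--             if string.index(k) < string.index(v):
--                 str_list.remove(k)
--                 str_list.remove(v)
--
--     if len(str_list) > 0:
--         return False
--     return True
-- ===== SOURCE B (Python) =====
-- def check(string):
--     # one scan: record the first-occurrence index of every character
--     first = {}
--     for i, ch in enumerate(string):
--         if ch not in first:
--             first[ch] = i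
--
--     def ok(k, v):
--         return k in first and v in first and first[k] < first[v]
--
--     matched = ok('[', ']') + ok('{', '}') + ok('(', ')')
--     return len(string) == 2 * matched
-- ===== Notes on version B (the rewrite author's own statement) =====
-- stated objective: alternative
-- what changed: B replaces A's per-pair string.index/list.remove passes by a single scan that builds a first-occurrence index dict, then three direct dict lookups and a length comparison len(string) == 2*matched.
import Mathlib
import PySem

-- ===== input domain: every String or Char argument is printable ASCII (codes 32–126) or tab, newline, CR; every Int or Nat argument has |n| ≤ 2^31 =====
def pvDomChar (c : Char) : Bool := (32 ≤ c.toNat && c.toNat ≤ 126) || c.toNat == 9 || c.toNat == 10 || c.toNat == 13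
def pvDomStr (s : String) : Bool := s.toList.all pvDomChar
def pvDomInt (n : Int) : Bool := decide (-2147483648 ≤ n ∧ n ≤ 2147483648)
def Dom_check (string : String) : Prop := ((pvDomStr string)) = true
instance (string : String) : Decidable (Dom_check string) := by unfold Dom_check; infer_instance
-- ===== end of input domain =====

-- B replaces A's per-pair index()/remove() passes by ONE scan building a first-occurrence
-- index dict, then three direct dict lookups and a length comparison (objective: alternative).

-- ===== PORT A =====
-- one loop body of A: 'if k in string and v in string: if string.index(k) < string.index(v): remove k; remove v'
-- 'k in string' → PySem.Chars.isIn [k]; 'string.index(k)' → PySem.Chars.find (exact here: the isIn guard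
-- ensures the substring is present, where find = index); list.remove → PySem.List.remove? (the none/getD
-- fallbacks are unreachable — both chars are still in str_list — and only keep the function total).
def pvStepA (s : List Char) (l : List Char) (kv : Char × Char) : List Char :=
  if PySem.Chars.isIn [kv.1] s && PySem.Chars.isIn [kv.2] s then
    if PySem.Chars.find s [kv.1] < PySem.Chars.find s [kv.2] then
      match PySem.List.remove? l kv.1 with
      | some l1 => (PySem.List.remove? l1 kv.2).getD l1
      | none => l
    else l
  else l

def check (string : String) : Bool :=
  let pattern : List (Char × Char) := [('[', ']'), ('{', '}'), ('(', ')')]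
  let s := string.toList                                  -- str_list = [s for s in string]
  let str_list := pattern.foldl (pvStepA s) s
  if str_list.length > 0 then false else true

-- ===== PORT B =====
-- 'for i, ch in enumerate(string): if ch not in first: first[ch] = i'
def pvFirst (s : List Char) : PySem.Dict Char Int :=
  (PySem.List.enumerate s).foldl
    (fun d p => if !(d.contains p.2) then d.insert p.2 p.1 else d) PySem.Dict.empty

-- 'ok(k, v) = k in first and v in first and first[k] < first[v]'
-- (first[k] is guarded by 'k in first', so getD's default is unreachable and only keeps it total)
def pvOk (first : PySem.Dict Char Int) (k v : Char) : Bool :=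
  first.contains k && first.contains v && decide (first.getD k 0 < first.getD v 0)

def check_alt (string : String) : Bool :=
  let first := pvFirst string.toList
  let matched : Int := (if pvOk first '[' ']' then 1 else 0)
    + (if pvOk first '{' '}' then 1 else 0) + (if pvOk first '(' ')' then 1 else 0)
  decide ((string.toList.length : Int) = 2 * matched)

-- ===== PRECONDITION & SPEC =====
def Spec_check (string : String) (out : Bool) : Prop := out = check_alt string
instance (string : String) (out : Bool) : Decidable (Spec_check string out) := by unfold Spec_check; infer_instance

-- ===== CLAIM (what is proved, stated in full; the proofs are below) =====
def Claim_equal_check : Prop := ∀ (string : String), Dom_check string → Spec_check string (check string)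

-- ===== LEMMAS AND PROOFS =====

-- the combined condition A's loop body tests for a pair
def pvCond (s : List Char) (k v : Char) : Prop :=
  PySem.Chars.isIn [k] s = true ∧ PySem.Chars.isIn [v] s = true ∧
    PySem.Chars.find s [k] < PySem.Chars.find s [v]

-- the same condition as a Bool (A tests it with &&, B via the dict)
def pvCondB (s : List Char) (k v : Char) : Bool :=
  PySem.Chars.isIn [k] s && PySem.Chars.isIn [v] s &&
    decide (PySem.Chars.find s [k] < PySem.Chars.find s [v])

theorem pvCondB_iff (s : List Char) (k v : Char) : pvCondB s k v = true ↔ pvCond s k v := by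
  unfold pvCondB pvCond; simp [and_assoc]

theorem pvCond_mem_left {s : List Char} {k v : Char} (h : pvCond s k v) : k ∈ s :=
  (List.singleton_infix_iff k s).mp ((PySem.Chars.isIn_iff_infix [k] s).mp h.1)

theorem pvCond_mem_right {s : List Char} {k v : Char} (h : pvCond s k v) : v ∈ s :=
  (List.singleton_infix_iff v s).mp ((PySem.Chars.isIn_iff_infix [v] s).mp h.2.1)

theorem pvStepA_pos (s l : List Char) (k v : Char) (h : pvCond s k v)
    (hk : k ∈ l) (hv : v ∈ l.erase k) :
    pvStepA s l (k, v) = (l.erase k).erase v := by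
  unfold pvStepA
  rw [if_pos (by simp [h.1, h.2.1]), if_pos h.2.2]
  simp [PySem.List.remove?_eq_some_erase l k hk,
    PySem.List.remove?_eq_some_erase (l.erase k) v hv]

theorem pvStepA_neg (s l : List Char) (k v : Char) (h : ¬ pvCond s k v) :
    pvStepA s l (k, v) = l := by
  unfold pvCond at h
  push Not at h
  unfold pvStepA
  by_cases h1 : PySem.Chars.isIn [k] s = true
  · by_cases h2 : PySem.Chars.isIn [v] s = true
    · rw [if_pos (by simp [h1, h2]), if_neg (not_lt.mpr (h h1 h2))]
    · rw [if_neg (by simp [h2])]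
  · rw [if_neg (by simp [h1])]

-- the six bracket characters of the pattern are pairwise distinct
def pvDistinct (ps : List (Char × Char)) : Prop :=
  ps.Pairwise (fun p q => p.1 ≠ q.1 ∧ p.1 ≠ q.2 ∧ p.2 ≠ q.1 ∧ p.2 ≠ q.2) ∧
    ∀ p ∈ ps, p.1 ≠ p.2

-- A-side loop invariant: the remaining list shrinks by exactly 2 for each pair satisfying pvCond
theorem pvFoldA (s : List Char) : ∀ (ps : List (Char × Char)) (l : List Char),
    pvDistinct ps →
    (∀ p ∈ ps, l.count p.1 = s.count p.1 ∧ l.count p.2 = s.count p.2) →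
    (ps.foldl (pvStepA s) l).length
      + 2 * (ps.countP (fun p => pvCondB s p.1 p.2)) = l.length := by
  intro ps
  induction ps with
  | nil => intro l _ _; simp
  | cons p ps ih =>
    intro l hdist hcnt
    obtain ⟨k, v⟩ := p
    have hpair := List.pairwise_cons.mp hdist.1
    have hkv : k ≠ v := hdist.2 (k, v) List.mem_cons_self
    have hdist' : pvDistinct ps := ⟨hpair.2, fun q hq => hdist.2 q (List.mem_cons_of_mem _ hq)⟩
    by_cases hc : pvCond s k v
    · -- matched pair: A erases k and v
      have hk : k ∈ l := List.count_pos_iff.mp (by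
        rw [(hcnt (k, v) List.mem_cons_self).1]
        exact List.count_pos_iff.mpr (pvCond_mem_left hc))
      have hv : v ∈ l.erase k := List.count_pos_iff.mp (by
        rw [List.count_erase_of_ne hkv.symm, (hcnt (k, v) List.mem_cons_self).2]
        exact List.count_pos_iff.mpr (pvCond_mem_right hc))
      rw [List.foldl_cons, pvStepA_pos s l k v hc hk hv]
      have hcnt' : ∀ q ∈ ps, ((l.erase k).erase v).count q.1 = s.count q.1 ∧
          ((l.erase k).erase v).count q.2 = s.count q.2 := by
        intro q hq
        obtain ⟨d1, d2, d3, d4⟩ := hpair.1 q hq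
        constructor
        · rw [List.count_erase_of_ne (Ne.symm d3), List.count_erase_of_ne (Ne.symm d1)]
          exact (hcnt q (List.mem_cons_of_mem _ hq)).1
        · rw [List.count_erase_of_ne (Ne.symm d4), List.count_erase_of_ne (Ne.symm d2)]
          exact (hcnt q (List.mem_cons_of_mem _ hq)).2
      have hrec := ih ((l.erase k).erase v) hdist' hcnt'
      have e1 := List.length_erase_of_mem hk
      have e2 := List.length_erase_of_mem hv
      have e3 : 0 < l.length := List.length_pos_of_mem hk
      have e4 : 0 < (l.erase k).length := List.length_pos_of_mem hv
      have hcb : pvCondB s k v = true := (pvCondB_iff s k v).mpr hc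
      rw [List.countP_cons, hcb, if_pos rfl]
      omega
    · -- unmatched pair: the list is unchanged
      rw [List.foldl_cons, pvStepA_neg s l k v hc]
      have hrec := ih l hdist' (fun q hq => hcnt q (List.mem_cons_of_mem _ hq))
      have hcb : pvCondB s k v = false :=
        Bool.eq_false_iff.mpr (fun hb => hc ((pvCondB_iff s k v).mp hb))
      rw [List.countP_cons, hcb, if_neg (by simp)]
      omega

-- B-side: [c] is a prefix of s.drop j exactly when s[j]? = some c
theorem pvPrefixDrop (s : List Char) (c : Char) (j : Nat) :
    [c] <+: s.drop j ↔ s[j]? = some c := by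
  constructor
  · intro h
    rcases h with ⟨t, ht⟩
    have : (s.drop j).head? = some c := by rw [← ht]; rfl
    rw [List.head?_drop] at this; exact this
  · intro h
    refine ⟨(s.drop j).tail, ?_⟩
    have hh : (s.drop j).head? = some c := by rw [List.head?_drop]; exact h
    cases hd : s.drop j with
    | nil => simp [hd] at hh
    | cons a t => simp [hd] at hh ⊢; exact hh.symm

-- string.index(c) = the idxOf? index, for a present character
theorem pvFind_eq_idxOf? (s : List Char) (c : Char) (h : c ∈ s) :
    ∃ n : Nat, s.idxOf? c = some n ∧ PySem.Chars.find s [c] = (n : Int) := by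
  have hnn : 0 ≤ PySem.Chars.find s [c] :=
    (PySem.Chars.find_nonneg_iff s [c]).mpr ((List.singleton_infix_iff c s).mpr h)
  obtain ⟨hpre, hmin⟩ := PySem.Chars.find_spec hnn
  refine ⟨(PySem.Chars.find s [c]).toNat, ?_, (Int.toNat_of_nonneg hnn).symm⟩
  rw [List.idxOf?_eq_some_iff]
  have hget := (pvPrefixDrop s c _).mp hpre
  have hlt : (PySem.Chars.find s [c]).toNat < s.length := by
    by_contra hge
    rw [List.getElem?_eq_none (by omega)] at hget
    simp at hget
  refine ⟨hlt, ?_, ?_⟩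
  · have := List.getElem?_eq_getElem hlt
    rw [this] at hget; exact Option.some.inj hget
  · intro j hj hgj
    exact hmin j hj ((pvPrefixDrop s c j).mpr (by rw [List.getElem?_eq_getElem (by omega), hgj]))

-- the first-occurrence dict of B's scan, characterised by idxOf?
theorem pvFirst_aux (s : List Char) : ∀ (st : Int) (d : PySem.Dict Char Int) (c : Char),
    ((PySem.List.enumerate s st).foldl
        (fun d p => if !(d.contains p.2) then d.insert p.2 p.1 else d) d).get? c =
      if d.contains c then d.get? c
      else Option.map (fun n : Nat => st + (n : Int)) (s.idxOf? c) := by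
  induction s with
  | nil =>
    intro st d c
    simp only [PySem.List.enumerate_nil, List.foldl_nil, List.idxOf?_nil]
    split_ifs with hc
    · rfl
    · exact (PySem.Dict.get?_eq_none_iff_contains d c).mpr (by simpa using hc)
  | cons x xs ih =>
    intro st d c
    rw [PySem.List.enumerate_cons, List.foldl_cons]
    by_cases hx : d.contains x = true
    · rw [show (if !(d.contains x) then d.insert x st else d) = d by simp [hx]]
      rw [ih (st + 1) d c]
      split_ifs with hc
      · rfl
      · have hcx : ¬ (x == c) = true := fun hb => hc (by rwa [eq_of_beq hb] at hx)
        rw [List.idxOf?_cons, if_neg hcx, Option.map_map]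
        congr 1; funext n; simp; ring
    · rw [show (if !(d.contains x) then d.insert x st else d) = d.insert x st by simp [hx]]
      rw [ih (st + 1) (d.insert x st) c]
      by_cases hcx : c = x
      · subst hcx
        rw [if_pos (PySem.Dict.contains_insert_self d c st),
          if_neg (by simpa using hx), List.idxOf?_cons, if_pos (by simp),
          PySem.Dict.get?_insert_self]
        simp
      · rw [PySem.Dict.contains_insert d x c st, PySem.Dict.get?_insert_of_ne d st hcx]
        have hb : (c == x) = false := by simpa using hcx
        rw [hb, Bool.false_or]
        split_ifs with hc
        · rfl
        · rw [List.idxOf?_cons, if_neg (by simpa using Ne.symm hcx), Option.map_map]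
          congr 1; funext n; simp; ring

-- B's per-pair test agrees with A's condition
theorem pvOk_eq (s : List Char) (k v : Char) :
    pvOk (pvFirst s) k v = pvCondB s k v := by
  have hget : ∀ c, (pvFirst s).get? c = Option.map (fun n : Nat => (n : Int)) (s.idxOf? c) := by
    intro c
    unfold pvFirst
    rw [pvFirst_aux s 0 PySem.Dict.empty c, if_neg (by simp [PySem.Dict.contains_empty])]
    simp
  unfold pvOk pvCondB
  rw [PySem.Dict.contains_eq_isSome_get? (pvFirst s) k,
    PySem.Dict.contains_eq_isSome_get? (pvFirst s) v,
    PySem.Dict.getD_eq_get?_getD (pvFirst s) k 0,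
    PySem.Dict.getD_eq_get?_getD (pvFirst s) v 0, hget k, hget v]
  by_cases hk : k ∈ s
  · by_cases hv : v ∈ s
    · obtain ⟨nk, hnk, hfk⟩ := pvFind_eq_idxOf? s k hk
      obtain ⟨nv, hnv, hfv⟩ := pvFind_eq_idxOf? s v hv
      rw [hnk, hnv]
      have hik : PySem.Chars.isIn [k] s = true :=
        (PySem.Chars.isIn_iff_infix [k] s).mpr ((List.singleton_infix_iff k s).mpr hk)
      have hiv : PySem.Chars.isIn [v] s = true :=
        (PySem.Chars.isIn_iff_infix [v] s).mpr ((List.singleton_infix_iff v s).mpr hv)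
      simp [hik, hiv, hfk, hfv]
    · have hiv : PySem.Chars.isIn [v] s = false := by
        rw [PySem.Chars.isIn_eq_false_iff]
        rw [List.singleton_infix_iff]; exact hv
      rw [List.idxOf?_eq_none_iff.mpr hv]
      simp [hiv]
  · have hik : PySem.Chars.isIn [k] s = false := by
      rw [PySem.Chars.isIn_eq_false_iff]
      rw [List.singleton_infix_iff]; exact hk
    rw [List.idxOf?_eq_none_iff.mpr hk]
    simp [hik]

-- the final comparison: the leftover list is empty iff len(string) = 2*matched
theorem pvFinal (m n t : Nat) (h : m + 2 * t = n) :
    (if m > 0 then false else true) = decide ((n : Int) = 2 * (t : Int)) := by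
  rcases Nat.eq_zero_or_pos m with h0 | h0
  · rw [if_neg (by omega)]
    symm
    rw [decide_eq_true_eq]
    omega
  · rw [if_pos h0]
    symm
    rw [decide_eq_false_iff_not]
    omega

-- ===== VERDICT (by name: the statement is the Claim_ definition above) =====
theorem check_spec : Claim_equal_check := by
  intro string _
  unfold Spec_check
  show (if (List.foldl (pvStepA string.toList) string.toList
        [('[', ']'), ('{', '}'), ('(', ')')]).length > 0 then false else true) =
      decide ((string.toList.length : Int) =
        2 * ((if pvOk (pvFirst string.toList) '[' ']' then 1 else 0)
          + (if pvOk (pvFirst string.toList) '{' '}' then 1 else 0)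
          + (if pvOk (pvFirst string.toList) '(' ')' then 1 else 0)))
  have hA := pvFoldA string.toList [('[', ']'), ('{', '}'), ('(', ')')] string.toList
    (by constructor <;> decide) (fun q _ => ⟨rfl, rfl⟩)
  rw [pvOk_eq, pvOk_eq, pvOk_eq]
  have hm : ((if pvCondB string.toList '[' ']' then (1:Int) else 0)
      + (if pvCondB string.toList '{' '}' then 1 else 0)
      + (if pvCondB string.toList '(' ')' then 1 else 0)) =
      (([('[', ']'), ('{', '}'), ('(', ')')].countP
        (fun p => pvCondB string.toList p.1 p.2) : Nat) : Int) := by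
    cases h1 : pvCondB string.toList '[' ']' <;>
      cases h2 : pvCondB string.toList '{' '}' <;>
        cases h3 : pvCondB string.toList '(' ')' <;>
          simp [h1, h2, h3]
  rw [hm]
  exact pvFinal _ _ _ hA
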